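-- pv_equiv track=rewrite | github.com/sujith-rek/information-retrival | assignment1/question2a.py | create_bi_word_index
-- ===== SOURCE A (Python) =====
-- def create_bi_word_index(documents: list) -> dict:
--     """Creates the bi-word index from the documents"""
--     bi_word_index = {}
--     for i, document in enumerate(documents):
--         for j in range(len(document) - 1):
--             bi_word = document[j] + " " + document[j + 1]
--             if bi_word not in bi_word_index:
--                 bi_word_index[bi_word] = {i}
--             else:
--                 bi_word_index[bi_word].add(i)
--     return dict(sorted(bi_word_index.items()))
-- ===== SOURCE B (Python) =====
-- def create_bi_word_index(documents: list) -> dict: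
--     """Creates the bi-word index from the documents"""
--     pairs = sorted(
--         (a + " " + b, i)
--         for i, document in enumerate(documents)
--         for a, b in zip(document, document[1:])
--     )
--     index = {}
--     prev = None
--     for bi_word, doc_id in pairs:
--         if bi_word != prev:
--             index[bi_word] = {doc_id}
--             prev = bi_word
--         else:
--             index[bi_word].add(doc_id)
--     return index
-- ===== Notes on version B (the rewrite author's own statement) =====
-- stated objective: alternative
-- what changed: A builds a hash dict of sets pair-by-pair while scanning and sorts the keys at the end; B materialises the flat list of (bi-word, doc id) pairs, sorts it once (so equal bi-words become adjacent and keys come out in final order), and builds each posting set by grouping adjacent equal keys with no membership test against the dict.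
import Mathlib
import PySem

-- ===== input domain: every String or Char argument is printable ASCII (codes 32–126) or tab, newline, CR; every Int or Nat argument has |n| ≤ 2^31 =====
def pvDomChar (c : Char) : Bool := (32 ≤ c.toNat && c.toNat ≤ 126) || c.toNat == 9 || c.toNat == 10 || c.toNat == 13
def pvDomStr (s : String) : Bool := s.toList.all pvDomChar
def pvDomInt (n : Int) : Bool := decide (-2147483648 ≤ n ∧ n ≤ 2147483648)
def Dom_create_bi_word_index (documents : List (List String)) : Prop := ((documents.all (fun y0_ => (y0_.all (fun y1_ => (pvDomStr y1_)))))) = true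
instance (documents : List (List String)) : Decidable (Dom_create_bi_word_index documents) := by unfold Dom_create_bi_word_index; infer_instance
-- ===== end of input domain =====

-- B re-implements A by materialising all (bi-word, doc id) pairs, sorting them once, and
-- grouping adjacent equal keys, instead of A's hash-dict-of-sets built per pair plus a final
-- key sort; same cost class, a genuinely different traversal (objective: alternative).

-- ===== PORT A =====
def create_bi_word_index (documents : List (List String)) : List (String × List Int) :=
  let bi_word_index : PySem.Dict String (PySem.Set Int) :=
    (PySem.List.enumerate documents).foldl (fun bwi p =>
      (PySem.List.pyRange 0 (PySem.List.len p.2 - 1)).foldl (fun bwi j =>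
        let bi_word := PySem.List.pyGetD p.2 j "" ++ " " ++ PySem.List.pyGetD p.2 (j + 1) ""
        if !bwi.contains bi_word then
          -- bi_word_index[bi_word] = {i}
          bwi.insert bi_word ([p.1] : PySem.Set Int)
        else
          -- bi_word_index[bi_word].add(i): in-place set update; Dict.insert keeps the key's position
          bwi.insert bi_word (PySem.Set.add (bwi.getD bi_word []) p.1)) bwi)
      PySem.Dict.empty
  -- sorted(bi_word_index.items()): keys are distinct, so Python's tuple comparison only ever
  -- reads the key; str '<' is code-point order = '<' on toList
  PySem.List.sorted bi_word_index.items (fun kv => kv.1.toList)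

-- ===== PORT B =====
def create_bi_word_index_alt (documents : List (List String)) : List (String × List Int) :=
  -- sorted((a + " " + b, i) for i, document in enumerate(documents) for a, b in zip(document, document[1:]))
  -- Python's tuple order on (str, int) is lexicographic: key toLex (chars, doc id)
  let pairs : List (String × Int) :=
    PySem.List.sorted
      ((PySem.List.enumerate documents).flatMap (fun p =>
        (p.2.zip (PySem.List.slice p.2 (some 1) none)).map (fun ab => (ab.1 ++ " " ++ ab.2, p.1))))
      (fun q => toLex (q.1.toList, q.2))
  let st :=
    pairs.foldl (fun (st : PySem.Dict String (PySem.Set Int) × Option String) q =>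
      if some q.1 ≠ st.2 then (st.1.insert q.1 ([q.2] : PySem.Set Int), some q.1)
      else (st.1.insert q.1 (PySem.Set.add (st.1.getD q.1 []) q.2), st.2))
      (PySem.Dict.empty, none)
  st.1.items

-- ===== PRECONDITION & SPEC =====
def Spec_create_bi_word_index (documents : List (List String)) (out : List (String × List Int)) : Prop := out = create_bi_word_index_alt documents
instance (documents : List (List String)) (out : List (String × List Int)) : Decidable (Spec_create_bi_word_index documents out) := by unfold Spec_create_bi_word_index; infer_instance

-- ===== CLAIM (what is proved, stated in full; the proofs are below) =====
def Claim_equal_create_bi_word_index : Prop := ∀ (documents : List (List String)), Dom_create_bi_word_index documents → Spec_create_bi_word_index documents (create_bi_word_index documents)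

-- ===== LEMMAS AND PROOFS =====
def pvStepA (d : PySem.Dict String (PySem.Set Int)) (q : String × Int) : PySem.Dict String (PySem.Set Int) :=
  if !d.contains q.1 then d.insert q.1 ([q.2] : PySem.Set Int)
  else d.insert q.1 (PySem.Set.add (d.getD q.1 []) q.2)
def pvVal (P : List (String × Int)) (w : String) : List Int :=
  PySem.List.dedup ((P.filter (fun q => q.1 == w)).map Prod.snd)
def pvTable (P : List (String × Int)) : List (String × List Int) :=
  (PySem.List.dedup (P.map Prod.fst)).map (fun w => (w, pvVal P w))

lemma pv_dedup_concat {α : Type} [BEq α] [LawfulBEq α] (xs : List α) (x : α) :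
    PySem.List.dedup (xs ++ [x]) =
      if x ∈ xs then PySem.List.dedup xs else PySem.List.dedup xs ++ [x] := by
  rw [PySem.List.dedup_eq_ofList, PySem.List.dedup_eq_ofList, PySem.Set.ofList_append_singleton,
    PySem.Set.add]
  by_cases h : x ∈ xs
  · rw [if_pos, if_pos h]
    simp [PySem.Set.contains, PySem.Set.mem_ofList, h]
  · rw [if_neg, if_neg h]
    simp only [PySem.Set.contains]
    simp [PySem.Set.mem_ofList, h]

lemma pv_foldA_items (P : List (String × Int)) :
    (P.foldl pvStepA PySem.Dict.empty).items = pvTable P := by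
  induction P using List.reverseRecOn with
  | nil => rfl
  | append_singleton P q ih =>
    rw [List.foldl_append, List.foldl_cons, List.foldl_nil]
    set D := P.foldl pvStepA PySem.Dict.empty with hD
    have hkeys : D.keys = PySem.List.dedup (P.map Prod.fst) := by
      rw [PySem.Dict.keys.eq_1, ih]
      unfold pvTable
      rw [List.map_map]
      exact List.map_id'' (congrFun rfl) _
    have hnodup : D.keys.Nodup := by rw [hkeys]; exact PySem.List.nodup_dedup _
    have hcont : D.contains q.1 = decide (q.1 ∈ P.map Prod.fst) := by
      rw [PySem.Dict.contains_eq_decide_mem_keys, hkeys]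
      simp
    by_cases hmem : q.1 ∈ P.map Prod.fst
    · have hct : D.contains q.1 = true := by rw [hcont]; simpa using hmem
      have hgetD : D.getD q.1 [] = pvVal P q.1 := by
        refine PySem.Dict.getD_of_mem_items D ?_ hnodup []
        rw [ih]
        unfold pvTable
        exact List.mem_map_of_mem ((PySem.List.mem_dedup _ _).mpr hmem)
      rw [pvStepA, hct]
      simp only [Bool.not_true, Bool.false_eq_true, if_false]
      rw [PySem.Dict.items_insert_of_contains D _ hct, ih]
      unfold pvTable
      rw [List.map_append, show List.map Prod.fst [q] = [q.1] from rfl, pv_dedup_concat,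
        if_pos hmem, List.map_map]
      refine List.map_congr_left (fun w hw => ?_)
      simp only [Function.comp]
      by_cases hwq : w = q.1
      · subst hwq
        simp only [BEq.rfl, if_pos]
        rw [hgetD]
        unfold pvVal
        rw [List.filter_append, List.map_append]
        have : List.filter (fun q' => q'.1 == q.1) [q] = [q] := by simp
        rw [this]
        rw [show List.map Prod.snd [q] = [q.2] from rfl]
        rw [PySem.List.dedup_eq_ofList, PySem.List.dedup_eq_ofList,
          PySem.Set.ofList_append_singleton]
      · have : (w == q.1) = false := by simpa using hwq
        simp only [this, Bool.false_eq_true, if_false]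
        unfold pvVal
        rw [List.filter_append]
        have : List.filter (fun q' => q'.1 == w) [q] = [] := by
          simp [show (q.1 == w) = false by simpa using fun h => hwq h.symm]
        rw [this, List.append_nil]
    · have hct : D.contains q.1 = false := by rw [hcont]; simpa using hmem
      rw [pvStepA, hct]
      simp only [Bool.not_false, if_true]
      rw [PySem.Dict.items_insert_of_not_contains D _ hct, ih]
      unfold pvTable
      rw [List.map_append, show List.map Prod.fst [q] = [q.1] from rfl, pv_dedup_concat,
        if_neg hmem, List.map_append]
      congr 1
      · refine List.map_congr_left (fun w hw => ?_)
        have hwP : w ∈ P.map Prod.fst := (PySem.List.mem_dedup _ _).mp hw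
        have hwq : (q.1 == w) = false := by
          simp only [beq_eq_false_iff_ne]
          rintro rfl
          exact hmem hwP
        unfold pvVal
        rw [List.filter_append]
        have : List.filter (fun q' => q'.1 == w) [q] = [] := by simp [hwq]
        rw [this, List.append_nil]
      · simp only [List.map_cons, List.map_nil]
        have h1 : List.filter (fun q' => q'.1 == q.1) P = [] := by
          rw [List.filter_eq_nil_iff]
          intro a ha
          simp only [beq_iff_eq]
          intro h
          apply hmem
          rw [← h]
          exact List.mem_map_of_mem ha
        unfold pvVal
        rw [List.filter_append, h1, List.nil_append]
        simp [PySem.List.dedup, PySem.Set.ofList, PySem.Set.add]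

lemma pv_foldA_keys (P : List (String × Int)) :
    (P.foldl pvStepA PySem.Dict.empty).keys = PySem.List.dedup (P.map Prod.fst) := by
  rw [PySem.Dict.keys.eq_1, pv_foldA_items]
  unfold pvTable
  rw [List.map_map]
  exact List.map_id'' (congrFun rfl) _

def pvStepB (st : PySem.Dict String (PySem.Set Int) × Option String) (q : String × Int) :
    PySem.Dict String (PySem.Set Int) × Option String :=
  if some q.1 ≠ st.2 then (st.1.insert q.1 ([q.2] : PySem.Set Int), some q.1)
  else (st.1.insert q.1 (PySem.Set.add (st.1.getD q.1 []) q.2), st.2)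

def pvSorted (P : List (String × Int)) : List (String × Int) :=
  PySem.List.sorted P (fun q => toLex (q.1.toList, q.2))

lemma pv_mem_iff_getLast? {w : String} {l : List String}
    (hp : l.Pairwise (fun a b => a.toList ≤ b.toList))
    (hq : ∀ a ∈ l, a.toList ≤ w.toList) : w ∈ l ↔ l.getLast? = some w := by
  induction l using List.reverseRecOn with
  | nil => simp
  | append_singleton l x ih =>
    rw [List.getLast?_concat]
    simp only [List.mem_append, List.mem_singleton, Option.some.injEq]
    constructor
    · rintro (hw | rfl)
      · have h1 : w.toList ≤ x.toList :=
          (List.pairwise_append.mp hp).2.2 w hw x (List.mem_singleton_self x)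
        have h2 : x.toList ≤ w.toList := hq x (by simp)
        exact (String.toList_inj.mp (le_antisymm h1 h2)).symm
      · rfl
    · rintro rfl; right; rfl

lemma pv_foldB (L : List (String × Int)) (h : L.Pairwise (fun a b => a.1.toList ≤ b.1.toList)) :
    L.foldl pvStepB (PySem.Dict.empty, none) =
      (L.foldl pvStepA PySem.Dict.empty, (L.map Prod.fst).getLast?) := by
  induction L using List.reverseRecOn with
  | nil => rfl
  | append_singleton L q ih =>
    have hsplit := List.pairwise_append.mp h
    rw [List.foldl_append, List.foldl_append, ih hsplit.1, List.foldl_cons, List.foldl_nil,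
      List.foldl_cons, List.foldl_nil, List.map_append,
      show List.map Prod.fst [q] = [q.1] from rfl, List.getLast?_concat]
    have hle : ∀ a ∈ L.map Prod.fst, a.toList ≤ q.1.toList := by
      intro a ha
      obtain ⟨p, hp, rfl⟩ := List.mem_map.mp ha
      exact hsplit.2.2 p hp q (List.mem_singleton_self q)
    have hpm : (L.map Prod.fst).Pairwise (fun a b => a.toList ≤ b.toList) :=
      List.pairwise_map.mpr hsplit.1
    have hiff := pv_mem_iff_getLast? hpm hle
    have hcont : (L.foldl pvStepA PySem.Dict.empty).contains q.1
        = decide (q.1 ∈ L.map Prod.fst) := by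
      rw [PySem.Dict.contains_eq_decide_mem_keys, pv_foldA_keys]
      simp
    rw [pvStepB, pvStepA]
    by_cases hmem : q.1 ∈ L.map Prod.fst
    · have hlast : (L.map Prod.fst).getLast? = some q.1 := hiff.mp hmem
      have hct : (L.foldl pvStepA PySem.Dict.empty).contains q.1 = true := by
        rw [hcont]; simpa using hmem
      rw [hlast, hct]
      simp
    · have hlast : some q.1 ≠ (L.map Prod.fst).getLast? := fun hc => hmem (hiff.mpr hc.symm)
      have hct : (L.foldl pvStepA PySem.Dict.empty).contains q.1 = false := by
        rw [hcont]; simpa using hmem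
      rw [hct, if_pos hlast]
      simp

lemma pv_sorted_pairwise_le (P : List (String × Int)) :
    (pvSorted P).Pairwise (fun a b =>
      a.1.toList < b.1.toList ∨ (a.1.toList = b.1.toList ∧ a.2 ≤ b.2)) := by
  have := PySem.List.sorted_pairwise (κ := Lex (List Char × Int)) P
    (fun q => toLex (q.1.toList, q.2))
  exact this.imp (fun h => (Prod.Lex.le_iff (α := List Char) (β := Int)).mp h)

lemma pv_sorted_fst_le (P : List (String × Int)) :
    (pvSorted P).Pairwise (fun a b => a.1.toList ≤ b.1.toList) :=
  (pv_sorted_pairwise_le P).imp (fun h => h.elim le_of_lt (fun h => le_of_eq h.1))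

lemma pv_ofList_sublist {α : Type} [BEq α] (xs : List α) : (PySem.Set.ofList xs).Sublist xs := by
  induction xs using List.reverseRecOn with
  | nil => simp [PySem.Set.ofList]
  | append_singleton xs x ih =>
    rw [PySem.Set.ofList_append_singleton, PySem.Set.add]
    split
    · exact ih.trans (List.sublist_append_left xs [x])
    · exact ih.append (List.Sublist.refl [x])

lemma pv_strict_of_nodup {K : List String} (hK : K.Nodup)
    (hp : K.Pairwise (fun a b => a.toList ≤ b.toList)) :
    K.Pairwise (fun a b => a.toList < b.toList) := by
  have := hK.and hp
  exact this.imp (fun ⟨hne, hle⟩ => lt_of_le_of_ne hle (fun hc => hne (String.toList_inj.mp hc)))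

lemma pv_sorted_congr {α κ : Type} [LT κ] (d1 d2 : DecidableLT κ) (xs : List α) (key : α → κ) :
    @PySem.List.sorted α κ _ d1 xs key false = @PySem.List.sorted α κ _ d2 xs key false := by
  rw [@PySem.List.sorted_eq_foldl_insertBy α κ _ d1 xs key,
      @PySem.List.sorted_eq_foldl_insertBy α κ _ d2 xs key]
  congr 1
  funext acc x
  congr 1
  funext a b
  exact decide_eq_decide.mpr Iff.rfl

lemma pv_keys_eq (P : List (String × Int)) :
    PySem.List.dedup ((pvSorted P).map Prod.fst) =
      PySem.List.sorted (PySem.List.dedup (P.map Prod.fst)) (fun w => w.toList) := by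
  rw [pv_sorted_congr (fun a b => a.decidableLT b)
    (@LinearOrder.toDecidableLT (List Char) List.instLinearOrder)]
  refine (PySem.List.sorted_eq_of_perm_of_pairwise_lt (κ := List Char) _ _ _ ?_ ?_).symm
  · rw [List.perm_ext_iff_of_nodup (PySem.List.nodup_dedup _) (PySem.List.nodup_dedup _)]
    intro a
    unfold pvSorted
    rw [PySem.List.mem_dedup, PySem.List.mem_dedup,
      ((PySem.List.sorted_perm P _ false).map Prod.fst).mem_iff]
  · refine pv_strict_of_nodup (PySem.List.nodup_dedup _) ?_
    refine List.Pairwise.sublist ?_ (List.pairwise_map.mpr (pv_sorted_fst_le P))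
    rw [PySem.List.dedup_eq_ofList]
    exact pv_ofList_sublist _

def pvPairs (documents : List (List String)) : List (String × Int) :=
  (PySem.List.enumerate documents).flatMap (fun p =>
    (p.2.zip p.2.tail).map (fun ab => (ab.1 ++ " " ++ ab.2, p.1)))

lemma pv_pairs_snd_mono (documents : List (List String)) :
    (pvPairs documents).Pairwise (fun a b => a.2 ≤ b.2) := by
  unfold pvPairs
  rw [List.pairwise_flatMap]
  constructor
  · intro a _
    refine List.pairwise_of_forall_mem_list ?_
    rintro x hx y hy
    obtain ⟨ab, _, rfl⟩ := List.mem_map.mp hx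
    obtain ⟨cd, _, rfl⟩ := List.mem_map.mp hy
    exact le_refl _
  · refine (PySem.List.pairwise_lt_enumerate documents 0).imp_of_mem ?_
    intro a b _ _ hab x hx y hy
    obtain ⟨_, _, rfl⟩ := List.mem_map.mp hx
    obtain ⟨_, _, rfl⟩ := List.mem_map.mp hy
    exact le_of_lt hab

lemma pv_val_eq (documents : List (List String)) (w : String) :
    pvVal (pvSorted (pvPairs documents)) w = pvVal (pvPairs documents) w := by
  unfold pvVal
  have hlist : ((pvSorted (pvPairs documents)).filter (fun q => q.1 == w)).map Prod.snd
      = ((pvPairs documents).filter (fun q => q.1 == w)).map Prod.snd := by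
    refine List.Perm.eq_of_pairwise (le := (· ≤ ·)) (fun a b _ _ h1 h2 => le_antisymm h1 h2)
      ?_ ?_ ?_
    · refine List.pairwise_map.mpr ?_
      refine ((pv_sorted_pairwise_le (pvPairs documents)).filter _).imp_of_mem ?_
      intro a b ha hb hab
      have ha1 : a.1 = w := by simpa using (List.mem_filter.mp ha).2
      have hb1 : b.1 = w := by simpa using (List.mem_filter.mp hb).2
      rcases hab with h | h
      · rw [ha1, hb1] at h; exact absurd h (lt_irrefl _)
      · exact h.2
    · exact List.pairwise_map.mpr ((pv_pairs_snd_mono documents).filter _)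
    · exact ((PySem.List.sorted_perm _ _ false).filter _).map _
  rw [hlist]

lemma pv_sortedA (P : List (String × Int)) :
    PySem.List.sorted (pvTable P) (fun kv => kv.1.toList) =
      (PySem.List.sorted (PySem.List.dedup (P.map Prod.fst)) (fun w => w.toList)).map
        (fun w => (w, pvVal P w)) := by
  simp only [pv_sorted_congr (fun a b => a.decidableLT b)
    (@LinearOrder.toDecidableLT (List Char) List.instLinearOrder)]
  refine PySem.List.sorted_eq_of_perm_of_pairwise_lt (κ := List Char) _ _ _ ?_ ?_
  · exact (@PySem.List.sorted_perm _ _ _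
      (@LinearOrder.toDecidableLT (List Char) List.instLinearOrder) _ _ false).map _
  · refine List.pairwise_map.mpr ?_
    refine pv_strict_of_nodup ?_ (PySem.List.sorted_pairwise _ _)
    exact ((@PySem.List.sorted_perm _ _ _
      (@LinearOrder.toDecidableLT (List Char) List.instLinearOrder) _ _ false).symm).nodup
      (PySem.List.nodup_dedup _)

lemma pv_zipJ (doc : List String) :
    (PySem.List.pyRange 0 (PySem.List.len doc - 1)).map
      (fun j => (PySem.List.pyGetD doc j "", PySem.List.pyGetD doc (j + 1) "")) =
      doc.zip doc.tail := by
  cases doc with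
  | nil => rfl
  | cons d ds =>
    have hlen : PySem.List.len (d :: ds) - 1 = (ds.length : Int) := by
      simp [PySem.List.len]
    rw [hlen, PySem.List.pyRange_zero_natCast, List.map_map]
    refine List.ext_getElem ?_ ?_
    · simp
    · intro k h1 h2
      have hk : k < ds.length := by simpa using h1
      simp only [List.getElem_map, List.getElem_range, Function.comp]
      rw [List.getElem_zip, List.getElem_tail]
      rw [PySem.List.pyGetD_natCast, show ((k : Int) + 1) = ((k + 1 : Nat) : Int) by push_cast; ring,
        PySem.List.pyGetD_natCast]
      rw [List.getD_eq_getElem _ _ (by simp; omega), List.getD_eq_getElem _ _ (by simp; omega)]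

lemma pv_mapJ (doc : List String) (i : Int) :
    (PySem.List.pyRange 0 (PySem.List.len doc - 1)).map
        (fun j => (PySem.List.pyGetD doc j "" ++ " " ++ PySem.List.pyGetD doc (j + 1) "", i)) =
      (doc.zip doc.tail).map (fun ab => (ab.1 ++ " " ++ ab.2, i)) := by
  rw [← pv_zipJ, List.map_map]
  rfl

lemma pv_A_eq (documents : List (List String)) :
    create_bi_word_index documents =
      PySem.List.sorted (pvTable (pvPairs documents)) (fun kv => kv.1.toList) := by
  rw [← pv_foldA_items]
  simp only [create_bi_word_index]
  congr 1
  congr 1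
  rw [pvPairs, List.foldl_flatMap]
  refine PySem.List.foldl_congr_mem _ _ _ _ ?_
  intro acc p _
  rw [← pv_mapJ p.2 p.1, List.foldl_map]
  rfl

lemma pv_B_eq (documents : List (List String)) :
    create_bi_word_index_alt documents = pvTable (pvSorted (pvPairs documents)) := by
  simp only [create_bi_word_index_alt]
  have hsl : ∀ xs : List String, PySem.List.slice xs (some 1) none = xs.tail := by
    intro xs
    rw [PySem.List.slice_from xs (by norm_num)]
    simp [List.drop_one]
  simp only [hsl]
  show ((pvSorted (pvPairs documents)).foldl pvStepB (PySem.Dict.empty, none)).1.items = _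
  rw [pv_foldB _ (pv_sorted_fst_le _), pv_foldA_items]


-- ===== VERDICT (by name: the statement is the Claim_ definition above) =====
theorem create_bi_word_index_spec : Claim_equal_create_bi_word_index := by
  intro documents _
  unfold Spec_create_bi_word_index
  rw [pv_A_eq, pv_B_eq, pv_sortedA]
  unfold pvTable
  rw [pv_keys_eq]
  exact List.map_congr_left (fun w _ => by rw [pv_val_eq])
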